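-- pv_equiv track=rewrite | github.com/AshBrandywine/PotAnalyzer | masktools.py | get_mask_derivatives
-- ===== SOURCE A (Python) =====
-- digit_mask = "?d"
--
-- year_length = 4
--
-- recent_centuries = ("19", "20")
--
-- famous_pre_1900_years = ("1054", "1088", "1206", "1215", "1453", "1455", "1492", "1509", "1517", "1519", "1564", "1651", "1687", "1776", "1789", "1815", "1825", "1859", "1885", "1893")
--
-- def _generate_mask_builder(mask):
--     mask_builder = []
--     for i in range(0, len(mask), 2):
--         mask_builder.append(mask[i] + mask[i+1])
--     return mask_builder
--
-- def _generate_year_derivatives(mask_builder, year_start_index):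
--     derivatives = []
--     derivative_builder = mask_builder.copy()
--     for year in famous_pre_1900_years:
--         for i in range(len(year)):
--             derivative_builder[year_start_index+i] = year[i]
--         derivatives.append("".join(derivative_builder))
--     for century in recent_centuries:
--         derivative_builder[year_start_index] = century[0]
--         derivative_builder[year_start_index+1] = century[1]
--         derivative_builder[year_start_index+2] = digit_mask
--         derivative_builder[year_start_index+3] = digit_mask
--         derivatives.append("".join(derivative_builder))
--     return derivatives
--
-- def _get_year_derivatives(mask_builder):
--     derivatives = []
--     year_start_index = -1
--     digit_counter = 0
--     for i in range(len(mask_builder)):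
--         char = mask_builder[i]
--         if char == digit_mask:
--             if digit_counter == 0:
--                 year_start_index = i
--             digit_counter += 1
--         else:
--             if digit_counter == year_length:
--                 new_derivatives = _generate_year_derivatives(mask_builder, year_start_index)
--                 derivatives.extend(new_derivatives)
--             digit_counter = 0
--     if digit_counter == year_length:
--         new_derivatives = _generate_year_derivatives(mask_builder, year_start_index)
--         derivatives.extend(new_derivatives)
--     return derivatives
--
-- def get_mask_derivatives(mask_list):
--     derivatives = []
--     for mask in mask_list:
--         mask_builder = _generate_mask_builder(mask)
--         year_derivatives = _get_year_derivatives(mask_builder)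
--         if len(year_derivatives) == 0:
--             derivatives.append(mask)
--         else:
--             derivatives.extend(year_derivatives)
--     return derivatives
-- ===== SOURCE B (Python) =====
-- # B: no tokenization -- direct string-window scan: a slot is an even index i where the next
-- # 8 chars are "?d?d?d?d" and the neighbouring 2-char windows are not "?d"; splice by slicing.
-- digit_mask = "?d"
-- year_length = 4
-- recent_centuries = ("19", "20")
-- famous_pre_1900_years = ("1054", "1088", "1206", "1215", "1453", "1455", "1492", "1509", "1517", "1519", "1564", "1651", "1687", "1776", "1789", "1815", "1825", "1859", "1885", "1893")
--
-- _RUN = digit_mask * year_length  # "?d?d?d?d"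
--
-- def get_mask_derivatives(mask_list):
--     out = []
--     for mask in mask_list:
--         found = False
--         for i in range(0, len(mask), 2):
--             if (mask[i:i + 8] == _RUN
--                     and mask[i - 2:i] != digit_mask
--                     and mask[i + 8:i + 10] != digit_mask):
--                 found = True
--                 prefix = mask[:i]
--                 suffix = mask[i + 8:]
--                 for year in famous_pre_1900_years:
--                     out.append(prefix + year + suffix)
--                 for century in recent_centuries:
--                     out.append(prefix + century + digit_mask + digit_mask + suffix)
--         if not found:
--             out.append(mask)
--     return out
-- ===== Notes on version B (the rewrite author's own statement) =====
-- stated objective: alternative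
-- what changed: B eliminates A's tokenize-into-pairs pipeline, digit-counter state machine and per-year in-place rebuild of the token list: it scans the raw string at even offsets for the literal 8-char window "?d?d?d?d" whose neighbouring 2-char windows are not "?d", and splices each derivative once from string slices prefix/suffix.
import Mathlib
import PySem

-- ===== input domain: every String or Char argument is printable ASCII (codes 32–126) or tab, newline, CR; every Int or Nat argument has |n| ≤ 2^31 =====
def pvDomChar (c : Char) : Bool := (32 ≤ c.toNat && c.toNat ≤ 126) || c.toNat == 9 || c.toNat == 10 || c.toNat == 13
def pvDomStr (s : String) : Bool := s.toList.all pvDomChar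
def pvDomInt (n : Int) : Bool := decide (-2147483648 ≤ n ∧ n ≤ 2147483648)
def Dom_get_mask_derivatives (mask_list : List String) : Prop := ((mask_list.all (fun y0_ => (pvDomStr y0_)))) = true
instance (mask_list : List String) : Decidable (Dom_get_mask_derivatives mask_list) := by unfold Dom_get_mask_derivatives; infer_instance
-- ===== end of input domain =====

-- B drops A's tokenize-then-count pipeline entirely: it scans the raw string at even offsets for
-- the 8-char window "?d?d?d?d" with non-"?d" neighbour windows and splices by string slicing
-- (objective: alternative).

-- Module constants (strings handled as `List Char` throughout, per PySem).
def pvDigitMask : List Char := ['?', 'd']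
def pvCenturies : List (List Char) := [['1','9'], ['2','0']]
def pvFamousYears : List (List Char) :=
  [['1','0','5','4'], ['1','0','8','8'], ['1','2','0','6'], ['1','2','1','5'], ['1','4','5','3'],
   ['1','4','5','5'], ['1','4','9','2'], ['1','5','0','9'], ['1','5','1','7'], ['1','5','1','9'],
   ['1','5','6','4'], ['1','6','5','1'], ['1','6','8','7'], ['1','7','7','6'], ['1','7','8','9'],
   ['1','8','1','5'], ['1','8','2','5'], ['1','8','5','9'], ['1','8','8','5'], ['1','8','9','3']]

-- ===== PORT A =====
-- A tokenizes with `mask[i] + mask[i+1]` over range(0, len, 2); `none` = the IndexError an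
-- odd-length mask raises (excluded by Pre_ below).
def pvPairTokens : List Char → Option (List (List Char))
  | [] => some []
  | [_] => none
  | a :: b :: rest => (pvPairTokens rest).map ([a, b] :: ·)

-- _generate_year_derivatives: mutates a copy of the builder in place, joins after each year/century.
def pvGenA (mb : List (List Char)) (ysi : Int) : List (List Char) :=
  let st := pvFamousYears.foldl
    (fun (st : List (List Char) × List (List Char)) year =>
      let db := (List.range year.length).foldl
        (fun db (j : Nat) => PySem.List.pySetD db (ysi + (j : Int)) [PySem.List.pyGetD year (j : Int) ' ']) st.2
      (st.1 ++ [PySem.Chars.join [] db], db))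
    ([], mb)
  (pvCenturies.foldl
    (fun (st : List (List Char) × List (List Char)) c =>
      let db := PySem.List.pySetD st.2 ysi [PySem.List.pyGetD c 0 ' ']
      let db := PySem.List.pySetD db (ysi + 1) [PySem.List.pyGetD c 1 ' ']
      let db := PySem.List.pySetD db (ysi + 2) pvDigitMask
      let db := PySem.List.pySetD db (ysi + 3) pvDigitMask
      (st.1 ++ [PySem.Chars.join [] db], db))
    st).1

-- the scan of _get_year_derivatives: state (derivatives, year_start_index, digit_counter), index i
def pvLoopA (mb : List (List Char)) : List (List Char) → Int → List (List Char) × Int × Nat → List (List Char) × Int × Nat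
  | [], _, st => st
  | c :: cs, i, (ders, ysi, dc) =>
    pvLoopA mb cs (i + 1)
      (if c = pvDigitMask then
        (ders, (if dc = 0 then i else ysi), dc + 1)
      else
        ((if dc = 4 then ders ++ pvGenA mb ysi else ders), ysi, 0))

def pvYearDerivsA (mb : List (List Char)) : List (List Char) :=
  match pvLoopA mb mb 0 ([], -1, 0) with
  | (ders, ysi, dc) => if dc = 4 then ders ++ pvGenA mb ysi else ders

def get_mask_derivatives (mask_list : List String) : List String :=
  mask_list.foldl
    (fun ders mask =>
      match pvPairTokens mask.toList with
      | none => ders   -- unreachable under Pre_: the Python raises IndexError here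
      | some mb =>
        let yd := pvYearDerivsA mb
        if yd.length = 0 then ders ++ [mask] else ders ++ yd.map (fun cs => String.ofList cs))
    []

-- ===== PORT B =====
-- the 8-char literal "?d?d?d?d" (digit_mask * year_length)
def pvRun8 : List Char := ['?', 'd', '?', 'd', '?', 'd', '?', 'd']

-- mask[i:i+8] == "?d?d?d?d" and mask[i-2:i] != "?d" and mask[i+8:i+10] != "?d"
def pvHitB (cs : List Char) (i : Int) : Bool :=
  (PySem.List.slice cs (some i) (some (i + 8)) == pvRun8)
  && !(PySem.List.slice cs (some (i - 2)) (some i) == pvDigitMask)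
  && !(PySem.List.slice cs (some (i + 8)) (some (i + 10)) == pvDigitMask)

-- the 22 appends done for one hit: prefix = mask[:i], suffix = mask[i+8:]
def pvEmitB (cs : List Char) (i : Int) : List (List Char) :=
  let pre := PySem.List.slice cs none (some i)
  let suf := PySem.List.slice cs (some (i + 8)) none
  pvFamousYears.map (fun y => pre ++ y ++ suf)
    ++ pvCenturies.map (fun c => pre ++ c ++ pvDigitMask ++ pvDigitMask ++ suf)

def get_mask_derivatives_alt (mask_list : List String) : List String :=
  mask_list.foldl
    (fun out mask =>
      let cs := mask.toList
      let st := (PySem.List.pyRange 0 (cs.length : Int) 2).foldl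
        (fun (st : Bool × List String) i =>
          if pvHitB cs i then (true, st.2 ++ (pvEmitB cs i).map (fun l => String.ofList l)) else st)
        (false, out)
      if st.1 then st.2 else st.2 ++ [mask])
    []

-- ===== PRECONDITION & SPEC =====
-- Pre_ excludes masks of odd length: there A raises IndexError at `mask[i+1]`.
def Pre_get_mask_derivatives (mask_list : List String) : Prop :=
  ∀ mask ∈ mask_list, mask.toList.length % 2 = 0
instance (mask_list : List String) : Decidable (Pre_get_mask_derivatives mask_list) := by
  unfold Pre_get_mask_derivatives; infer_instance

def pvWitness_get_mask_derivatives : List String := ["?d?d?d?d?s", "ab", ""]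

def Spec_get_mask_derivatives (mask_list : List String) (out : List String) : Prop := out = get_mask_derivatives_alt mask_list
instance (mask_list : List String) (out : List String) : Decidable (Spec_get_mask_derivatives mask_list out) := by unfold Spec_get_mask_derivatives; infer_instance

-- ===== CLAIM (what is proved, stated in full; the proofs are below) =====
def Claim_equal_get_mask_derivatives : Prop := ∀ (mask_list : List String), Dom_get_mask_derivatives mask_list → Pre_get_mask_derivatives mask_list → Spec_get_mask_derivatives mask_list (get_mask_derivatives mask_list)


-- ===== LEMMAS AND PROOFS =====

-- proof-side prefix/suffix splice at TOKEN position pos (the common value of both emitters)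
def pvGenB (tokens : List (List Char)) (pos : Nat) : List (List Char) :=
  let pre := (tokens.take pos).flatten
  let suf := (tokens.drop (pos + 4)).flatten
  pvFamousYears.map (fun y => pre ++ y ++ suf) ++
    pvCenturies.map (fun c => pre ++ c ++ pvDigitMask ++ pvDigitMask ++ suf)

-- maximal runs of equal tokens with their lengths
def pvRunsB : List (List Char) → List (List Char × Nat)
  | [] => []
  | t :: rest =>
    (t, 1 + (rest.takeWhile (· == t)).length) :: pvRunsB (rest.dropWhile (· == t))
  termination_by l => l.length
  decreasing_by
    have := List.length_dropWhile_le (· == t) rest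
    simp only [List.length_cons]; omega

-- output of the run scan
def pvOutB (tokens : List (List Char)) : List (List Char × Nat) → Nat → List (List Char)
  | [], _ => []
  | g :: rs, pos =>
    (if g.1 = pvDigitMask ∧ g.2 = 4 then pvGenB tokens pos else []) ++ pvOutB tokens rs (pos + g.2)

-- token-level window hit: exactly B's three window tests, read on the token list
def pvTHit (ts : List (List Char)) (s : Nat) : Bool :=
  ((ts.drop s).take 4 == [pvDigitMask, pvDigitMask, pvDigitMask, pvDigitMask])
  && !((if s = 0 then ([] : List (List Char)) else (ts.drop (s - 1)).take 1) == [pvDigitMask])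
  && !((ts.drop (s + 4)).take 1 == [pvDigitMask])

-- output of the window scan over token positions pos, pos+1, …, pos+m-1
def pvWinOut (ts : List (List Char)) (pos m : Nat) : List (List Char) :=
  (List.range m).flatMap (fun j => if pvTHit ts (pos + j) then pvGenB ts (pos + j) else [])

theorem pv_join_nil (l : List (List Char)) : PySem.Chars.join [] l = l.flatten := by
  induction l with
  | nil => rfl
  | cons a l ih =>
    cases l with
    | nil => simp [PySem.Chars.join, List.intercalate]
    | cons b m =>
      simp only [PySem.Chars.join, List.intercalate, List.intersperse] at *
      simp_all [List.flatten]

theorem pv_setMid {α : Type} (pre mid post : List α) (j : Nat) (v : α) (h : j < mid.length) :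
    (pre ++ mid ++ post).set (pre.length + j) v = pre ++ mid.set j v ++ post := by
  rw [List.append_assoc, List.set_append_right _ _ (by omega),
    List.set_append_left _ _ (by simpa using h)]
  simp

-- the inner year loop rewrites exactly the 4-token middle window
theorem pv_yearFold (pre post : List (List Char)) (i : Nat) (hpre : pre.length = i)
    (year : List Char) (h4 : year.length = 4) (mid : List (List Char)) (hmid : mid.length = 4) :
    (List.range year.length).foldl
      (fun db (j : Nat) => PySem.List.pySetD db ((i : Int) + (j : Int)) [PySem.List.pyGetD year (j : Int) ' '])
      (pre ++ mid ++ post)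
    = pre ++ year.map (fun c => [c]) ++ post := by
  match year, h4, mid, hmid with
  | [a,b,c,d0], _, [m0,m1,m2,m3], _ =>
    show (List.range 4).foldl _ _ = _
    rw [show List.range 4 = [0,1,2,3] from rfl]
    simp only [List.foldl_cons, List.foldl_nil]
    rw [show (i:Int) + ((0:Nat):Int) = ((i + 0 : Nat) : Int) by push_cast; ring,
        show (i:Int) + ((1:Nat):Int) = ((i + 1 : Nat) : Int) by push_cast; ring,
        show (i:Int) + ((2:Nat):Int) = ((i + 2 : Nat) : Int) by push_cast; ring,
        show (i:Int) + ((3:Nat):Int) = ((i + 3 : Nat) : Int) by push_cast; ring]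
    simp only [PySem.List.pySetD_natCast, PySem.List.pyGetD_natCast]
    rw [show i + 0 = pre.length + 0 by omega]
    rw [pv_setMid _ _ _ _ _ (by simp)]
    simp only [List.set_cons_zero, List.set_cons_succ]
    rw [show i + 1 = pre.length + 1 by omega]
    rw [pv_setMid _ _ _ _ _ (by simp)]
    simp only [List.set_cons_zero, List.set_cons_succ]
    rw [show i + 2 = pre.length + 2 by omega]
    rw [pv_setMid _ _ _ _ _ (by simp)]
    simp only [List.set_cons_zero, List.set_cons_succ]
    rw [show i + 3 = pre.length + 3 by omega]
    rw [pv_setMid _ _ _ _ _ (by simp)]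
    simp [List.getD]

theorem pv_famFold (pre post : List (List Char)) (i : Nat) (hpre : pre.length = i)
    (years : List (List Char)) (hall : ∀ y ∈ years, y.length = 4) :
    ∀ (acc : List (List Char)) (mid : List (List Char)), mid.length = 4 →
    ∃ mid', mid'.length = 4 ∧
      years.foldl
        (fun (st : List (List Char) × List (List Char)) year =>
          let db := (List.range year.length).foldl
            (fun db (j : Nat) => PySem.List.pySetD db ((i : Int) + (j : Int)) [PySem.List.pyGetD year (j : Int) ' ']) st.2
          (st.1 ++ [PySem.Chars.join [] db], db))
        (acc, pre ++ mid ++ post)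
      = (acc ++ years.map (fun y => pre.flatten ++ y ++ post.flatten), pre ++ mid' ++ post) := by
  induction years with
  | nil => intro acc mid hmid; exact ⟨mid, hmid, by simp⟩
  | cons y ys ih =>
    intro acc mid hmid
    have hy := hall y (List.mem_cons_self ..)
    obtain ⟨mid', hm', heq⟩ := ih (fun z hz => hall z (List.mem_cons_of_mem _ hz))
      (acc ++ [PySem.Chars.join [] (pre ++ y.map (fun c => [c]) ++ post)])
      (y.map (fun c => [c])) (by simp [hy])
    refine ⟨mid', hm', ?_⟩
    simp only [List.foldl_cons]
    rw [pv_yearFold pre post i hpre y hy mid hmid, heq]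
    simp only [List.map_cons, pv_join_nil]
    simp [List.flatten_append]
    rw [← pv_join_nil, PySem.Chars.join_nil_singletons]

theorem pv_set4 (pre post : List (List Char)) (i : Nat) (hpre : pre.length = i)
    (mid : List (List Char)) (hmid : mid.length = 4) (e0 e1 e2 e3 : List Char) :
    PySem.List.pySetD (PySem.List.pySetD (PySem.List.pySetD (PySem.List.pySetD
      (pre ++ mid ++ post) (i : Int) e0) ((i : Int) + 1) e1) ((i : Int) + 2) e2) ((i : Int) + 3) e3
    = pre ++ [e0, e1, e2, e3] ++ post := by
  match mid, hmid with
  | [m0,m1,m2,m3], _ =>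
    rw [show ((i : Int) + 1) = ((i + 1 : Nat) : Int) by push_cast; ring,
        show ((i : Int) + 2) = ((i + 2 : Nat) : Int) by push_cast; ring,
        show ((i : Int) + 3) = ((i + 3 : Nat) : Int) by push_cast; ring]
    simp only [PySem.List.pySetD_natCast]
    rw [show i = pre.length + 0 by omega]
    rw [pv_setMid _ _ _ _ _ (by simp)]
    simp only [List.set_cons_zero, List.set_cons_succ]
    rw [show pre.length + 0 + 1 = pre.length + 1 by omega]
    rw [pv_setMid _ _ _ _ _ (by simp)]
    simp only [List.set_cons_zero, List.set_cons_succ]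
    rw [show pre.length + 0 + 2 = pre.length + 2 by omega]
    rw [pv_setMid _ _ _ _ _ (by simp)]
    simp only [List.set_cons_zero, List.set_cons_succ]
    rw [show pre.length + 0 + 3 = pre.length + 3 by omega]
    rw [pv_setMid _ _ _ _ _ (by simp)]
    simp

theorem pv_genEq (mb : List (List Char)) (i : Nat) (h : i + 4 ≤ mb.length) :
    pvGenA mb (i : Int) = pvGenB mb i := by
  have hpre : (mb.take i).length = i := by rw [List.length_take]; omega
  have hmid : ((mb.drop i).take 4).length = 4 := by
    rw [List.length_take, List.length_drop]; omega
  have hmb : mb = mb.take i ++ (mb.drop i).take 4 ++ mb.drop (i + 4) := by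
    rw [List.append_assoc]
    conv_lhs => rw [← List.take_append_drop i mb]
    congr 1
    conv_lhs => rw [← List.take_append_drop 4 (mb.drop i)]
    congr 1
    rw [List.drop_drop]
  obtain ⟨mid', hm', heq⟩ := pv_famFold (mb.take i) (mb.drop (i + 4)) i hpre
    pvFamousYears (by decide) [] ((mb.drop i).take 4) hmid
  unfold pvGenA pvGenB
  conv_lhs => rw [hmb]
  rw [heq]
  simp only [pvCenturies, List.foldl_cons, List.foldl_nil]
  rw [pv_set4 _ _ _ hpre _ hm']
  rw [pv_set4 _ _ _ hpre _ (by simp)]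
  simp [pv_join_nil, pvFamousYears, pvDigitMask]
  exact ⟨by decide, by decide⟩

-- A's scan over a digit run with a nonzero counter
theorem pv_runDigit (mb : List (List Char)) (k : Nat) :
    ∀ (rest : List (List Char)) (i : Int) (d : List (List Char)) (y : Int) (dc : Nat), dc ≠ 0 →
      pvLoopA mb (List.replicate k pvDigitMask ++ rest) i (d, y, dc)
        = pvLoopA mb rest (i + k) (d, y, dc + k) := by
  induction k with
  | zero => intro rest i d y dc _; simp
  | succ k ih =>
    intro rest i d y dc hdc
    have h1 : List.replicate (k + 1) pvDigitMask ++ rest = pvDigitMask :: (List.replicate k pvDigitMask ++ rest) := by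
      simp [List.replicate_succ]
    rw [h1]
    show pvLoopA mb (List.replicate k pvDigitMask ++ rest) (i + 1)
        (if pvDigitMask = pvDigitMask then (d, (if dc = 0 then i else y), dc + 1)
         else ((if dc = 4 then d ++ pvGenA mb y else d), y, 0)) = _
    rw [if_pos rfl, if_neg hdc, ih _ _ _ _ _ (by omega),
      (by omega : dc + 1 + k = dc + (k + 1)),
      (by push_cast; ring : i + 1 + (k : Int) = i + ((k + 1 : Nat) : Int))]

-- A's scan over a run of non-digit tokens with counter 0
theorem pv_runOther (mb : List (List Char)) (t : List Char) (ht : t ≠ pvDigitMask) (k : Nat) :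
    ∀ (rest : List (List Char)) (i : Int) (d : List (List Char)) (y : Int),
      pvLoopA mb (List.replicate k t ++ rest) i (d, y, 0)
        = pvLoopA mb rest (i + k) (d, y, 0) := by
  induction k with
  | zero => intro rest i d y; simp
  | succ k ih =>
    intro rest i d y
    have h1 : List.replicate (k + 1) t ++ rest = t :: (List.replicate k t ++ rest) := by
      simp [List.replicate_succ]
    rw [h1]
    show pvLoopA mb (List.replicate k t ++ rest) (i + 1)
        (if t = pvDigitMask then (d, (if 0 = 0 then i else y), 0 + 1)
         else ((if 0 = 4 then d ++ pvGenA mb y else d), y, 0)) = _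
    rw [if_neg ht]
    simp only [if_neg (by omega : ¬ (0 = 4))]
    rw [ih, (by push_cast; ring : i + 1 + (k : Int) = i + ((k + 1 : Nat) : Int))]

-- finishing step of A's scan (the post-loop digit_counter == 4 check)
def pvFinA (mb : List (List Char)) : List (List Char) × Int × Nat → List (List Char)
  | (d, y, dc) => if dc = 4 then d ++ pvGenA mb y else d

-- A's scan/runs correspondence
theorem pv_main (mb : List (List Char)) :
    ∀ (n : Nat) (ts : List (List Char)), ts.length ≤ n →
      ∀ (i : Nat) (d : List (List Char)) (y : Int),
      mb.drop i = ts →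
      pvFinA mb (pvLoopA mb ts (i : Int) (d, y, 0)) = d ++ pvOutB mb (pvRunsB ts) i := by
  intro n
  induction n with
  | zero =>
    intro ts hts i d y hdrop
    have h0 : ts = [] := List.length_eq_zero_iff.mp (Nat.le_zero.mp hts)
    subst h0
    simp [pvLoopA, pvRunsB, pvOutB, pvFinA]
  | succ n ih =>
    intro ts hts i d y hdrop
    match ts, hts, hdrop with
    | [], _, _ => simp [pvLoopA, pvRunsB, pvOutB, pvFinA]
    | t :: rest0, hts, hdrop =>
      obtain ⟨k0, rem, htw, hrem⟩ :
          ∃ k0 rem, rest0.takeWhile (· == t) = List.replicate k0 t ∧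
            rest0.dropWhile (· == t) = rem :=
        ⟨(rest0.takeWhile (· == t)).length, rest0.dropWhile (· == t),
          by
            rw [List.eq_replicate_iff]
            exact ⟨rfl, fun b hb => by simpa using List.mem_takeWhile_imp hb⟩, rfl⟩
      have hsplit : rest0 = List.replicate k0 t ++ rem := by
        rw [← htw, ← hrem, List.takeWhile_append_dropWhile]
      have hlenmb : mb.length - i = rest0.length + 1 := by
        have := congrArg List.length hdrop
        simpa [List.length_drop] using this
      have hile : i ≤ mb.length := by
        by_contra h
        have : mb.drop i = [] := List.drop_eq_nil_of_le (by omega)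
        rw [hdrop] at this; exact List.cons_ne_nil _ _ this
      have hlen : mb.length = i + 1 + rest0.length := by omega
      have hrlen : rest0.length = k0 + rem.length := by
        rw [hsplit]; simp
      have hdrop' : mb.drop (i + (1 + k0)) = rem := by
        have h1 : mb.drop (i + (1 + k0)) = (mb.drop i).drop (1 + k0) := by
          rw [List.drop_drop]
        rw [h1, hdrop, (by omega : 1 + k0 = k0 + 1), List.drop_succ_cons, hsplit,
          List.drop_left' (by simp)]
      have hremle : rem.length ≤ n := by
        have h2 := List.length_dropWhile_le (· == t) rest0
        rw [hrem] at h2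
        simp only [List.length_cons] at hts
        omega
      have hruns : pvRunsB (t :: rest0) = (t, 1 + k0) :: pvRunsB rem := by
        rw [pvRunsB, htw, hrem, List.length_replicate]
      rw [hruns]
      by_cases hdm : t = pvDigitMask
      · subst hdm
        have hA : pvLoopA mb (pvDigitMask :: rest0) (i : Int) (d, y, 0)
            = pvLoopA mb rem ((i : Int) + 1 + (k0 : Int)) (d, (i : Int), 1 + k0) := by
          show pvLoopA mb rest0 ((i : Int) + 1)
              (if pvDigitMask = pvDigitMask then (d, (if 0 = 0 then (i : Int) else y), 0 + 1)
               else ((if 0 = 4 then d ++ pvGenA mb y else d), y, 0)) = _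
          rw [if_pos rfl, if_pos rfl, hsplit,
            pv_runDigit mb k0 rem ((i : Int) + 1) d (i : Int) 1 (by omega),
            (by omega : 1 + k0 = k0 + 1)]
        match rem, hdrop', hremle, hruns, hrem, hsplit, hrlen with
        | [], hdrop', hremle, hruns, hrem, hsplit, hrlen =>
          rw [hA]
          simp only [pvLoopA, pvFinA]
          by_cases h4 : 1 + k0 = 4
          · rw [if_pos h4]
            have hgen : pvGenA mb (i : Int) = pvGenB mb i :=
              pv_genEq mb i (by omega)
            simp [pvOutB, pvRunsB, h4, hgen]
          · rw [if_neg h4]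
            simp [pvOutB, pvRunsB, h4]
        | c :: cs, hdrop', hremle, hruns, hrem, hsplit, hrlen =>
          have hc : ¬ (c = pvDigitMask) := by
            have hne : rest0.dropWhile (· == pvDigitMask) ≠ [] := by
              rw [hrem]; exact List.cons_ne_nil _ _
            have h3 := List.head_dropWhile_not (· == pvDigitMask) hne
            rw [show (rest0.dropWhile (· == pvDigitMask)).head hne = c from by simp [hrem]] at h3
            simpa using h3
          have hB : pvLoopA mb (c :: cs) ((i : Int) + 1 + (k0 : Int)) (d, (i : Int), 1 + k0)
              = pvLoopA mb (c :: cs) ((i + (1 + k0) : Nat) : Int)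
                  ((if 1 + k0 = 4 then d ++ pvGenA mb (i : Int) else d), (i : Int), 0) := by
            show pvLoopA mb cs ((i : Int) + 1 + (k0 : Int) + 1)
                (if c = pvDigitMask then (d, (if 1 + k0 = 0 then (i : Int) + 1 + (k0 : Int) else (i : Int)), (1 + k0) + 1)
                 else ((if 1 + k0 = 4 then d ++ pvGenA mb (i : Int) else d), (i : Int), 0)) = _
            rw [if_neg hc]
            show _ = pvLoopA mb cs (((i + (1 + k0) : Nat) : Int) + 1)
                (if c = pvDigitMask then ((if 1 + k0 = 4 then d ++ pvGenA mb (i : Int) else d), (if 0 = 0 then ((i + (1 + k0) : Nat) : Int) else (i : Int)), 0 + 1)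
                 else ((if 0 = 4 then (if 1 + k0 = 4 then d ++ pvGenA mb (i : Int) else d) ++ pvGenA mb (i : Int) else (if 1 + k0 = 4 then d ++ pvGenA mb (i : Int) else d)), (i : Int), 0))
            rw [if_neg hc, if_neg (by omega : ¬ (0 = 4)),
              (by push_cast; ring : (i : Int) + 1 + (k0 : Int) + 1 = ((i + (1 + k0) : Nat) : Int) + 1)]
          rw [hA, hB, ih (c :: cs) hremle (i + (1 + k0)) _ _ hdrop']
          by_cases h4 : 1 + k0 = 4
          · have hgen : pvGenA mb (i : Int) = pvGenB mb i :=
              pv_genEq mb i (by simp only [List.length_cons] at hrlen; omega)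
            simp [pvOutB, h4, hgen]
          · simp [pvOutB, h4]
      · have hA : pvLoopA mb (t :: rest0) (i : Int) (d, y, 0)
            = pvLoopA mb rem ((i : Int) + ((1 + k0 : Nat) : Int)) (d, y, 0) := by
          conv_lhs =>
            rw [show t :: rest0 = List.replicate (1 + k0) t ++ rem by
              rw [(by omega : 1 + k0 = k0 + 1), List.replicate_succ, hsplit]; rfl]
          rw [pv_runOther mb t hdm (1 + k0) rem (i : Int) d y]
        rw [hA, (by push_cast; ring : (i : Int) + ((1 + k0 : Nat) : Int) = ((i + (1 + k0) : Nat) : Int)),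
          ih rem hremle (i + (1 + k0)) d y hdrop']
        simp [pvOutB, hdm]

-- window split
theorem pv_tok_facts : ∀ (cs : List Char) (ts : List (List Char)), pvPairTokens cs = some ts →
    cs = ts.flatten ∧ (∀ t ∈ ts, t.length = 2)
  | [], ts, h => by
    simp [pvPairTokens] at h; subst h; exact ⟨rfl, by simp⟩
  | [_], ts, h => by simp [pvPairTokens] at h
  | a :: b :: rest, ts, h => by
    simp only [pvPairTokens, Option.map_eq_some_iff] at h
    obtain ⟨ts', hts', rfl⟩ := h
    obtain ⟨h1, h2⟩ := pv_tok_facts rest ts' hts'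
    refine ⟨by simp [← h1], ?_⟩
    intro t ht
    rcases List.mem_cons.mp ht with rfl | ht
    · rfl
    · exact h2 t ht

theorem pv_flatten_len2 (ts : List (List Char)) (h : ∀ t ∈ ts, t.length = 2) :
    ts.flatten.length = 2 * ts.length := by
  induction ts with
  | nil => simp
  | cons t ts ih =>
    simp only [List.flatten_cons, List.length_append, List.length_cons,
      h t (List.mem_cons_self ..), ih (fun x hx => h x (List.mem_cons_of_mem _ hx))]
    ring

theorem pv_flatten_drop (ts : List (List Char)) (h : ∀ t ∈ ts, t.length = 2) (s : Nat) :
    ts.flatten.drop (2 * s) = (ts.drop s).flatten := by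
  induction s generalizing ts with
  | zero => simp
  | succ s ih =>
    cases ts with
    | nil => simp
    | cons t ts =>
      have ht := h t (List.mem_cons_self ..)
      have : 2 * (s + 1) = t.length + 2 * s := by omega
      rw [List.flatten_cons, this, ← List.drop_drop, List.drop_left,
        ih ts (fun x hx => h x (List.mem_cons_of_mem _ hx))]
      simp

theorem pv_flatten_take (ts : List (List Char)) (h : ∀ t ∈ ts, t.length = 2) (k : Nat) :
    ts.flatten.take (2 * k) = (ts.take k).flatten := by
  induction k generalizing ts with
  | zero => simp
  | succ k ih =>
    cases ts with
    | nil => simp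
    | cons t ts =>
      have ht := h t (List.mem_cons_self ..)
      have h2 : 2 * (k + 1) = t.length + 2 * k := by omega
      rw [List.flatten_cons, h2, List.take_append]
      rw [Nat.add_sub_cancel_left, ih ts (fun x hx => h x (List.mem_cons_of_mem _ hx))]
      simp [List.take_of_length_le (by omega : t.length ≤ t.length + 2*k)]

theorem pv_win_eq_run8 (ws : List (List Char)) (h : ∀ t ∈ ws, t.length = 2) :
    (ws.flatten == pvRun8) = (ws == [pvDigitMask, pvDigitMask, pvDigitMask, pvDigitMask]) := by
  rw [Bool.eq_iff_iff, beq_iff_eq, beq_iff_eq]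
  constructor
  · intro hf
    have hlen : ws.length = 4 := by
      have := pv_flatten_len2 ws h
      rw [hf] at this
      simp [pvRun8] at this; omega
    match ws, hlen with
    | [w0, w1, w2, w3], _ =>
      obtain ⟨a0, b0, rfl⟩ := List.length_eq_two.mp (h w0 (by simp))
      obtain ⟨a1, b1, rfl⟩ := List.length_eq_two.mp (h w1 (by simp))
      obtain ⟨a2, b2, rfl⟩ := List.length_eq_two.mp (h w2 (by simp))
      obtain ⟨a3, b3, rfl⟩ := List.length_eq_two.mp (h w3 (by simp))
      simp [pvRun8, pvDigitMask] at hf ⊢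
      tauto
  · intro hw; subst hw; rfl

theorem pv_win_eq_dm (ws : List (List Char)) (h : ∀ t ∈ ws, t.length = 2) :
    (ws.flatten == pvDigitMask) = (ws == [pvDigitMask]) := by
  rw [Bool.eq_iff_iff, beq_iff_eq, beq_iff_eq]
  constructor
  · intro hf
    have hlen : ws.length = 1 := by
      have := pv_flatten_len2 ws h
      rw [hf] at this
      simp [pvDigitMask] at this; omega
    match ws, hlen with
    | [w0], _ =>
      obtain ⟨a0, b0, rfl⟩ := List.length_eq_two.mp (h w0 (by simp))
      simp [pvDigitMask] at hf ⊢
      exact hf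
  · intro hw; subst hw; rfl

theorem pv_slice_win (ts : List (List Char)) (h : ∀ t ∈ ts, t.length = 2) (s k : Nat) :
    PySem.List.slice ts.flatten (some ((2 * s : Nat) : Int)) (some (((2 * s : Nat) : Int) + ((2 * k : Nat) : Int)))
      = ((ts.drop s).take k).flatten := by
  rw [PySem.List.slice_natCast_add, pv_flatten_drop ts h s,
    ← pv_flatten_take (ts.drop s) (fun x hx => h x (List.mem_of_mem_drop hx)) k]

theorem pv_hit_bridge (ts : List (List Char)) (h : ∀ t ∈ ts, t.length = 2) (s : Nat) :
    pvHitB ts.flatten ((2 * s : Nat) : Int) = pvTHit ts s := by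
  unfold pvHitB pvTHit
  have hdrop2 : ∀ x, (∀ t ∈ ts.drop x, (t : List Char).length = 2) :=
    fun x t ht => h t (List.mem_of_mem_drop ht)
  have hmid : PySem.List.slice ts.flatten (some ((2 * s : Nat) : Int)) (some (((2 * s : Nat) : Int) + 8))
      = ((ts.drop s).take 4).flatten := by
    have := pv_slice_win ts h s 4
    rwa [show (((2 * 4 : Nat) : Int)) = 8 by norm_num] at this
  have hright : PySem.List.slice ts.flatten (some (((2 * s : Nat) : Int) + 8)) (some (((2 * s : Nat) : Int) + 10))
      = ((ts.drop (s + 4)).take 1).flatten := by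
    have := pv_slice_win ts h (s + 4) 1
    rwa [show ((2 * (s + 4) : Nat) : Int) = ((2 * s : Nat) : Int) + 8 by push_cast; ring,
      show ((2 * 1 : Nat) : Int) = 2 by norm_num,
      show ((2 * s : Nat) : Int) + 8 + 2 = ((2 * s : Nat) : Int) + 10 by ring] at this
  have hLlist : PySem.List.slice ts.flatten (some (((2 * s : Nat) : Int) - 2)) (some ((2 * s : Nat) : Int))
      = (if s = 0 then ([] : List (List Char)) else (ts.drop (s - 1)).take 1).flatten := by
    by_cases hs : s = 0
    · subst hs
      rw [if_pos rfl]
      apply List.eq_nil_of_length_eq_zero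
      rw [show ((2 * 0 : Nat) : Int) = ((0 : Nat) : Int) by norm_num]
      rw [PySem.List.length_slice]
      simp
    · rw [if_neg hs]
      have := pv_slice_win ts h (s - 1) 1
      rwa [show ((2 * (s - 1) : Nat) : Int) = ((2 * s : Nat) : Int) - 2 by push_cast [Nat.mul_sub]; omega,
        show ((2 * 1 : Nat) : Int) = 2 by norm_num,
        show ((2 * s : Nat) : Int) - 2 + 2 = ((2 * s : Nat) : Int) by ring] at this
  rw [hmid, hright, hLlist,
    pv_win_eq_run8 _ (fun t ht => hdrop2 s t (List.mem_of_mem_take ht)),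
    pv_win_eq_dm _ (fun t ht => hdrop2 (s + 4) t (List.mem_of_mem_take ht)),
    pv_win_eq_dm _ (fun t ht => by
      by_cases hs : s = 0
      · simp [hs] at ht
      · rw [if_neg hs] at ht
        exact hdrop2 (s - 1) t (List.mem_of_mem_take ht))]

theorem pv_winSplit (ts : List (List Char)) (pos k m : Nat) :
    pvWinOut ts pos (k + m) = pvWinOut ts pos k ++ pvWinOut ts (pos + k) m := by
  unfold pvWinOut
  rw [List.range_add, List.flatMap_append, List.flatMap_map]
  congr 1
  apply List.flatMap_congr
  intro j hj
  simp [Nat.add_assoc]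

-- a window whose first token differs from ?d never matches the 4-window

theorem pv_take4_head_ne (t : List Char) (ht : t ≠ pvDigitMask) (m : Nat) (hm : 1 ≤ m) (rem : List (List Char)) :
    (((List.replicate m t ++ rem).take 4) == [pvDigitMask, pvDigitMask, pvDigitMask, pvDigitMask]) = false := by
  match m, hm with
  | m + 1, _ =>
    rw [List.replicate_succ]
    simp [ht]

theorem pv_runs_win (ts : List (List Char)) :
    ∀ (n : Nat) (suffix : List (List Char)), suffix.length ≤ n → ∀ (pos : Nat), ts.drop pos = suffix →
    (pos = 0 ∨ (ts.drop (pos - 1)).take 1 ≠ [pvDigitMask] ∨ (ts.drop pos).take 1 ≠ [pvDigitMask]) →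
    pvOutB ts (pvRunsB suffix) pos = pvWinOut ts pos suffix.length := by
  intro n
  induction n with
  | zero =>
    intro suffix hle pos hdrop hbnd
    have h0 : suffix = [] := List.length_eq_zero_iff.mp (Nat.le_zero.mp hle)
    subst h0
    simp [pvRunsB, pvOutB, pvWinOut]
  | succ n ih =>
    intro suffix hle pos hdrop hbnd
    match suffix, hle, hdrop, hbnd with
    | [], _, _, _ => simp [pvRunsB, pvOutB, pvWinOut]
    | t :: rest0, hle, hdrop, hbnd =>
      obtain ⟨k0, rem, htw, hrem⟩ :
          ∃ k0 rem, rest0.takeWhile (· == t) = List.replicate k0 t ∧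
            rest0.dropWhile (· == t) = rem :=
        ⟨(rest0.takeWhile (· == t)).length, rest0.dropWhile (· == t),
          by
            rw [List.eq_replicate_iff]
            exact ⟨rfl, fun b hb => by simpa using List.mem_takeWhile_imp hb⟩, rfl⟩
      have hsplit : t :: rest0 = List.replicate (1 + k0) t ++ rem := by
        rw [(by omega : 1 + k0 = k0 + 1), List.replicate_succ, ← htw, ← hrem]
        simp [List.takeWhile_append_dropWhile]
      have hremhead : ∀ (c : List Char) (cs : List (List Char)), rem = c :: cs → c ≠ t := by
        intro c cs hc
        have hne : rest0.dropWhile (· == t) ≠ [] := by rw [hrem, hc]; exact List.cons_ne_nil _ _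
        have h3 := List.head_dropWhile_not (· == t) hne
        rw [show (rest0.dropWhile (· == t)).head hne = c from by simp [hrem, hc]] at h3
        simpa using h3
      have hruns : pvRunsB (t :: rest0) = (t, 1 + k0) :: pvRunsB rem := by
        rw [pvRunsB, htw, hrem, List.length_replicate]
      have hremlen : (t :: rest0).length = (1 + k0) + rem.length := by
        rw [hsplit]; simp
      have hremle : rem.length ≤ n := by
        have h2 := List.length_dropWhile_le (· == t) rest0
        rw [hrem] at h2
        simp only [List.length_cons] at hle
        omega
      -- drops inside the run
      have hdd : ∀ (j : Nat), ts.drop (pos + j) = (t :: rest0).drop j := by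
        intro j
        rw [← hdrop, Nat.add_comm, ← List.drop_drop]
        simp [List.drop_drop, Nat.add_comm]
      have hdj : ∀ (j : Nat), j ≤ 1 + k0 → ts.drop (pos + j) = List.replicate (1 + k0 - j) t ++ rem := by
        intro j hj
        rw [hdd j, hsplit, List.drop_append_of_le_length (by simp; omega), List.drop_replicate]
      have hdrem : ts.drop (pos + (1 + k0)) = rem := by
        rw [hdj (1 + k0) le_rfl]
        simp
      -- no hit strictly inside the run
      have hinner : ∀ (j : Nat), 1 ≤ j → j < 1 + k0 → pvTHit ts (pos + j) = false := by
        intro j h1 h2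
        unfold pvTHit
        by_cases ht : t = pvDigitMask
        · -- left window is [t] = [?d]
          have hL : ts.drop (pos + j - 1) = List.replicate (1 + k0 - (j - 1)) t ++ rem := by
            rw [show pos + j - 1 = pos + (j - 1) by omega]
            exact hdj (j - 1) (by omega)
          rw [if_neg (by omega : ¬ (pos + j = 0)), show pos + j - 1 = pos + (j - 1) by omega,
            hdj (j - 1) (by omega),
            show 1 + k0 - (j - 1) = (1 + k0 - j) + 1 by omega, List.replicate_succ]
          subst ht
          simp
        · rw [hdj j (by omega)]
          rw [pv_take4_head_ne t ht (1 + k0 - j) (by omega) rem]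
          simp
      -- value of the hit at the run start
      have hstart : pvTHit ts pos = decide (t = pvDigitMask ∧ 1 + k0 = 4) := by
        unfold pvTHit
        have hd0 : ts.drop pos = List.replicate (1 + k0) t ++ rem := by
          rw [hdrop, hsplit]
        by_cases ht : t = pvDigitMask
        · subst ht
          -- left factor is true
          have hleft : (!((if pos = 0 then ([] : List (List Char)) else (ts.drop (pos - 1)).take 1) == [pvDigitMask])) = true := by
            by_cases hp : pos = 0
            · simp [hp]
            · rw [if_neg hp]
              rcases hbnd with h | h | h
              · exact absurd h hp
              · simp [h]
              · exfalso
                apply h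
                rw [hdrop]
                rfl
          rw [hleft]
          by_cases h4 : 1 + k0 = 4
          · -- run of exactly 4
            have hmid : ((ts.drop pos).take 4 == [pvDigitMask, pvDigitMask, pvDigitMask, pvDigitMask]) = true := by
              rw [hd0, h4]
              simp [List.take_append_of_le_length, List.replicate]
            have hr : ts.drop (pos + 4) = rem := by rw [← h4]; exact hdrem
            have hright : (((ts.drop (pos + 4)).take 1) == [pvDigitMask]) = false := by
              rw [hr]
              cases hc : rem with
              | nil => simp
              | cons c cs => simp [hremhead c cs hc]
            rw [hmid, hright]
            simp [h4]
          · rcases (by omega : 1 + k0 ≥ 5 ∨ 1 + k0 ≤ 3) with h5 | h3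
            · -- long run: the token after the window is still ?d
              have hright : (((ts.drop (pos + 4)).take 1) == [pvDigitMask]) = true := by
                rw [hdj 4 (by omega), show 1 + k0 - 4 = (1 + k0 - 5) + 1 by omega, List.replicate_succ]
                simp
              rw [hright]
              simp [h4]
            · -- short run: the 4-window is not all ?d
              have hmid : ((ts.drop pos).take 4 == [pvDigitMask, pvDigitMask, pvDigitMask, pvDigitMask]) = false := by
                rw [hd0]
                cases hc : rem with
                | nil =>
                  have hk : k0 ≤ 2 := by omega
                  interval_cases k0 <;> simp [List.replicate]
                | cons c cs =>
                  have hcne := hremhead c cs hc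
                  have hk : k0 ≤ 2 := by omega
                  interval_cases k0 <;> simp [List.replicate, hcne]
              rw [hmid]
              simp [h4]
        · have hmid : ((ts.drop pos).take 4 == [pvDigitMask, pvDigitMask, pvDigitMask, pvDigitMask]) = false := by
            rw [hd0]
            exact pv_take4_head_ne t ht (1 + k0) (by omega) rem
          rw [hmid]
          simp [ht]
      -- the run block of the window scan
      have hblock : pvWinOut ts pos (1 + k0) = (if t = pvDigitMask ∧ 1 + k0 = 4 then pvGenB ts pos else []) := by
        unfold pvWinOut
        rw [show 1 + k0 = k0 + 1 by omega, List.range_succ_eq_map, List.flatMap_cons, List.flatMap_map]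
        have hrest : (List.range k0).flatMap (fun j => if pvTHit ts (pos + (j + 1)) then pvGenB ts (pos + (j + 1)) else []) = [] := by
          apply List.flatMap_eq_nil_iff.mpr
          intro j hj
          rw [hinner (j + 1) (by omega) (by simp at hj; omega)]
          simp
        rw [hrest, List.append_nil, Nat.add_zero, hstart]
        by_cases hq : t = pvDigitMask ∧ 1 + k0 = 4
        · rw [decide_eq_true hq, if_pos (⟨hq.1, by omega⟩ : t = pvDigitMask ∧ k0 + 1 = 4)]
          simp
        · rw [decide_eq_false hq,
            if_neg (show ¬ (t = pvDigitMask ∧ k0 + 1 = 4) from fun h => hq ⟨h.1, by omega⟩)]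
          simp
      -- the rest of the list, by induction
      have hrec : pvOutB ts (pvRunsB rem) (pos + (1 + k0)) = pvWinOut ts (pos + (1 + k0)) rem.length := by
        apply ih rem hremle _ hdrem
        right
        have hprev : ts.drop (pos + (1 + k0) - 1) = t :: rem := by
          rw [show pos + (1 + k0) - 1 = pos + k0 by omega, hdj k0 (by omega),
            show 1 + k0 - k0 = 1 by omega]
          rfl
        by_cases ht : t = pvDigitMask
        · right
          rw [hdrem]
          cases hc : rem with
          | nil => simp
          | cons c cs =>
            have := hremhead c cs hc
            simp [ht] at this
            simp [this]
        · left
          rw [hprev]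
          simp [ht]
      rw [hruns]
      show (if t = pvDigitMask ∧ 1 + k0 = 4 then pvGenB ts pos else []) ++ pvOutB ts (pvRunsB rem) (pos + (1 + k0)) = _
      rw [hrec, show (t :: rest0).length = (1 + k0) + rem.length from hremlen, pv_winSplit, hblock]

theorem pv_emit_bridge (ts : List (List Char)) (h : ∀ t ∈ ts, t.length = 2) (s : Nat) :
    pvEmitB ts.flatten ((2 * s : Nat) : Int) = pvGenB ts s := by
  unfold pvEmitB pvGenB
  rw [PySem.List.slice_to_natCast, pv_flatten_take ts h s]
  rw [show (((2 * s : Nat) : Int) + 8) = ((2 * (s + 4) : Nat) : Int) by push_cast; ring,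
    PySem.List.slice_from_natCast, pv_flatten_drop ts h (s + 4)]

theorem pv_foldB (cs : List Char) (l : List Int) :
    ∀ (found : Bool) (out : List String),
    l.foldl (fun (st : Bool × List String) i =>
        if pvHitB cs i then (true, st.2 ++ (pvEmitB cs i).map (fun l => String.ofList l)) else st)
      (found, out)
    = (found || l.any (fun i => pvHitB cs i),
       out ++ l.flatMap (fun i => if pvHitB cs i then (pvEmitB cs i).map (fun l => String.ofList l) else [])) := by
  induction l with
  | nil => intro found out; simp
  | cons i l ihl =>
    intro found out
    simp only [List.foldl_cons, List.any_cons, List.flatMap_cons]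
    by_cases hi : pvHitB cs i
    · rw [if_pos hi, ihl, if_pos hi]
      simp [hi]
    · rw [if_neg hi, ihl, if_neg hi]
      simp [Bool.eq_false_iff.mpr hi]

theorem pv_pyRange_even (m : Nat) :
    PySem.List.pyRange 0 ((2 * m : Nat) : Int) 2 = (List.range m).map (fun k => ((2 * k : Nat) : Int)) := by
  rw [PySem.List.pyRange_of_pos _ _ (by norm_num)]
  rcases Nat.eq_zero_or_pos m with hm | hm
  · subst hm; simp
  · rw [if_pos (by push_cast; omega)]
    have : ((((2 * m : Nat) : Int) - 0 + 2 - 1) / 2).toNat = m := by omega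
    rw [this]
    apply List.map_congr_left
    intro k _
    push_cast; ring

theorem pv_genB_ne_nil (ts : List (List Char)) (pos : Nat) : pvGenB ts pos ≠ [] := by
  simp [pvGenB, pvFamousYears]

theorem pv_winOut_eq_nil_iff (ts : List (List Char)) (n : Nat) :
    pvWinOut ts 0 n = [] ↔ (List.range n).any (fun s => pvTHit ts s) = false := by
  unfold pvWinOut
  simp only [Nat.zero_add]
  rw [List.flatMap_eq_nil_iff, List.any_eq_false]
  constructor
  · intro h s hs
    have := h s hs
    by_cases hh : pvTHit ts s
    · rw [if_pos hh] at this
      exact absurd this (pv_genB_ne_nil ts s)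
    · simp [hh]
  · intro h s hs
    rw [if_neg (by simpa using h s hs)]

theorem pv_even_tok : ∀ (cs : List Char), cs.length % 2 = 0 → ∃ ts, pvPairTokens cs = some ts
  | [], _ => ⟨[], rfl⟩
  | [_], h => by simp at h
  | a :: b :: rest, h => by
    obtain ⟨ts, hts⟩ := pv_even_tok rest (by simp [List.length_cons] at h; omega)
    exact ⟨[a, b] :: ts, by simp [pvPairTokens, hts]⟩

theorem pv_maskB_eq (cs : List Char) (ts : List (List Char)) (htok : pvPairTokens cs = some ts) (out : List String) :
    (PySem.List.pyRange 0 (cs.length : Int) 2).foldl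
      (fun (st : Bool × List String) i =>
        if pvHitB cs i then (true, st.2 ++ (pvEmitB cs i).map (fun l => String.ofList l)) else st)
      (false, out)
    = ((List.range ts.length).any (fun s => pvTHit ts s),
       out ++ (pvWinOut ts 0 ts.length).map (fun l => String.ofList l)) := by
  obtain ⟨hcs, h2⟩ := pv_tok_facts cs ts htok
  subst hcs
  have hlen : ts.flatten.length = 2 * ts.length := pv_flatten_len2 ts h2
  rw [show ((ts.flatten.length : Nat) : Int) = ((2 * ts.length : Nat) : Int) by rw [hlen],
    pv_pyRange_even, pv_foldB]
  congr 1
  · rw [Bool.false_or, List.any_map]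
    congr 1
    funext s
    exact pv_hit_bridge ts h2 s
  · rw [List.flatMap_map]
    unfold pvWinOut
    rw [List.map_flatMap]
    congr 1
    apply List.flatMap_congr
    intro s _
    rw [pv_hit_bridge ts h2 s, pv_emit_bridge ts h2 s, Nat.zero_add]
    by_cases hh : pvTHit ts s
    · rw [if_pos hh, if_pos hh]
    · rw [if_neg hh, if_neg hh]
      simp

-- A's per-mask result, via runs then via windows
theorem pv_A_win (ts : List (List Char)) :
    pvYearDerivsA ts = pvWinOut ts 0 ts.length := by
  have hmain := pv_main ts ts.length ts le_rfl 0 [] (-1) (by simp)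
  rw [Nat.cast_zero] at hmain
  have h1 : pvYearDerivsA ts = pvFinA ts (pvLoopA ts ts 0 ([], -1, 0)) := by
    unfold pvYearDerivsA pvFinA
    rcases pvLoopA ts ts 0 ([], -1, 0) with ⟨d', y', dc'⟩
    rfl
  rw [h1, hmain, pv_runs_win ts ts.length ts le_rfl 0 (by simp) (Or.inl rfl)]
  simp

-- the two per-mask updates agree on every even-length mask
theorem pv_step_eq (mask : String) (acc : List String) (hm : mask.toList.length % 2 = 0) :
    (match pvPairTokens mask.toList with
     | none => acc
     | some mb =>
       let yd := pvYearDerivsA mb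
       if yd.length = 0 then acc ++ [mask] else acc ++ yd.map (fun cs => String.ofList cs))
    = (let cs := mask.toList
       let st := (PySem.List.pyRange 0 (cs.length : Int) 2).foldl
         (fun (st : Bool × List String) i =>
           if pvHitB cs i then (true, st.2 ++ (pvEmitB cs i).map (fun l => String.ofList l)) else st)
         (false, acc)
       if st.1 then st.2 else st.2 ++ [mask]) := by
  obtain ⟨ts, htok⟩ := pv_even_tok mask.toList hm
  rw [htok]
  show (let yd := pvYearDerivsA ts
        if yd.length = 0 then acc ++ [mask] else acc ++ yd.map (fun cs => String.ofList cs)) = _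
  simp only [pv_maskB_eq mask.toList ts htok acc, pv_A_win ts]
  by_cases hany : (List.range ts.length).any (fun s => pvTHit ts s) = true
  · have hne : pvWinOut ts 0 ts.length ≠ [] := by
      intro h0
      rw [(pv_winOut_eq_nil_iff ts ts.length).mp h0] at hany
      exact Bool.false_ne_true hany
    rw [if_neg (by simpa [List.length_eq_zero_iff] using hne), if_pos hany]
  · have h0 : pvWinOut ts 0 ts.length = [] :=
      (pv_winOut_eq_nil_iff ts ts.length).mpr (Bool.eq_false_iff.mpr hany)
    rw [if_pos (by simp [h0]), if_neg hany, h0]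
    simp

theorem get_mask_derivatives_spec : Claim_equal_get_mask_derivatives := by
  unfold Claim_equal_get_mask_derivatives
  intro mask_list hdom hpre
  clear hdom
  unfold Spec_get_mask_derivatives get_mask_derivatives get_mask_derivatives_alt
  suffices h : ∀ (ml : List String), (∀ m ∈ ml, m.toList.length % 2 = 0) → ∀ (acc : List String),
      ml.foldl
        (fun ders mask =>
          match pvPairTokens mask.toList with
          | none => ders
          | some mb =>
            let yd := pvYearDerivsA mb
            if yd.length = 0 then ders ++ [mask] else ders ++ yd.map (fun cs => String.ofList cs)) acc
      = ml.foldl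
        (fun out mask =>
          let cs := mask.toList
          let st := (PySem.List.pyRange 0 (cs.length : Int) 2).foldl
            (fun (st : Bool × List String) i =>
              if pvHitB cs i then (true, st.2 ++ (pvEmitB cs i).map (fun l => String.ofList l)) else st)
            (false, out)
          if st.1 then st.2 else st.2 ++ [mask]) acc by
    exact h mask_list hpre []
  intro ml
  induction ml with
  | nil => intro _ acc; rfl
  | cons m ms ih =>
    intro hp acc
    simp only [List.foldl_cons]
    rw [pv_step_eq m acc (hp m (List.mem_cons_self ..))]
    exact ih (fun x hx => hp x (List.mem_cons_of_mem _ hx)) _
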